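-- pv_equiv track=rewrite | github.com/euribates/agent_madrox | dml.py | forloop
-- ===== SOURCE A (Python) =====
-- def forloop(sequence, start=0):
--     sequence = list(sequence)
--     if sequence:
--         last_pos = len(sequence) - 1
--         for index, value in enumerate(sequence):
--             is_first = bool(index == 0)
--             is_last = bool(index == last_pos)
--             yield (index+start, is_first, is_last, value)
-- ===== SOURCE B (Python) =====
-- def forloop(sequence, start=0):
--     it = iter(sequence)
--     try:
--         prev = next(it)
--     except StopIteration:
--         return
--     index = 0
--     for value in it:
--         yield (index + start, index == 0, False, prev)
--         prev = value
--         index += 1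
--     yield (index + start, index == 0, True, prev)
-- ===== Notes on version B (the rewrite author's own statement) =====
-- stated objective: alternative
-- what changed: Replaced materialize-then-enumerate (list() plus precomputed last_pos checked at every step) with a single-pass streaming generator using a one-element lookahead buffer, so is_last is known without knowing the length.
import Mathlib
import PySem

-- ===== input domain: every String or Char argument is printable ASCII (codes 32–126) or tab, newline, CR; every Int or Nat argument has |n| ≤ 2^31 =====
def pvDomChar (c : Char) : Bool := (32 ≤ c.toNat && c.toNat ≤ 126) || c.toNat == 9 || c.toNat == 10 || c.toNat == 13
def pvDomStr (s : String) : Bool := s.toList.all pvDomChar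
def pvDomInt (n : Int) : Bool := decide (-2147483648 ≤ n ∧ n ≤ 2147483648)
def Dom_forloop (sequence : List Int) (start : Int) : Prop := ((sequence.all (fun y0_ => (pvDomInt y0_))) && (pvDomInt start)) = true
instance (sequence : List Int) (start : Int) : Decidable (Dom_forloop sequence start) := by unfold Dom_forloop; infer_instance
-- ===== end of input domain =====

-- B replaces A's materialize-then-enumerate (list() + precomputed last_pos) with a single-pass
-- streaming lookahead generator; alternative decomposition, same O(n) cost, return value identical.


-- ===== PORT A =====
-- A: materialize the sequence, compute last_pos = len-1, enumerate and yield
-- (index+start, index==0, index==last_pos, value); the generator's yields collected as a list.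
def forloop (sequence : List Int) (start : Int) : List (Int × Bool × Bool × Int) :=
  if sequence = [] then []
  else
    let lastPos : Int := (sequence.length : Int) - 1
    (PySem.List.enumerate sequence).map
      (fun p => (p.1 + start, decide (p.1 = 0), decide (p.1 = lastPos), p.2))

-- ===== PORT B =====
-- B's loop: holding buffered element `prev` and counter `index`, for each further value yield
-- (index+start, index==0, False, prev) and advance; at the end yield prev with is_last=True.
def forloopAltLoop (start index prev : Int) : List Int → List (Int × Bool × Bool × Int)
  | [] => [(index + start, decide (index = 0), true, prev)]
  | value :: rest =>
      (index + start, decide (index = 0), false, prev) :: forloopAltLoop start (index + 1) value rest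

def forloop_alt (sequence : List Int) (start : Int) : List (Int × Bool × Bool × Int) :=
  match sequence with
  | [] => []
  | prev :: rest => forloopAltLoop start 0 prev rest

-- ===== PRECONDITION & SPEC =====
def Spec_forloop (sequence : List Int) (start : Int) (out : List (Int × Bool × Bool × Int)) : Prop := out = forloop_alt sequence start
instance (sequence : List Int) (start : Int) (out : List (Int × Bool × Bool × Int)) : Decidable (Spec_forloop sequence start out) := by unfold Spec_forloop; infer_instance

-- ===== CLAIM (what is proved, stated in full; the proofs are below) =====
def Claim_equal_forloop : Prop := ∀ (sequence : List Int) (start : Int), Dom_forloop sequence start → Spec_forloop sequence start (forloop sequence start)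

-- ===== LEMMAS AND PROOFS =====
theorem forloopAltLoop_eq (t : List Int) : ∀ (h start idx : Int),
    forloopAltLoop start idx h t =
      (PySem.List.enumerate (h :: t) idx).map
        (fun p => (p.1 + start, decide (p.1 = 0), decide (p.1 = idx + (t.length : Int)), p.2)) := by
  induction t with
  | nil =>
      intro h start idx
      simp [forloopAltLoop, PySem.List.enumerate_cons, PySem.List.enumerate_nil]
  | cons x xs ih =>
      intro h start idx
      have hfalse : decide (idx = idx + ((x :: xs).length : Int)) = false := by
        simp; omega
      simp only [forloopAltLoop, PySem.List.enumerate_cons, List.map_cons, hfalse]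
      rw [ih x start (idx + 1)]
      simp only [PySem.List.enumerate_cons, List.map_cons, List.length_cons]
      push_cast
      have e : idx + 1 + (xs.length : Int) = idx + ((xs.length : Int) + 1) := by ring
      rw [e]

-- ===== VERDICT (by name: the statement is the Claim_ definition above) =====
theorem forloop_spec : Claim_equal_forloop := by
  intro sequence start _
  unfold Spec_forloop forloop forloop_alt
  match sequence with
  | [] => simp
  | h :: t =>
      simp only [if_neg (List.cons_ne_nil h t)]
      rw [forloopAltLoop_eq t h start 0]
      apply List.map_congr_left
      intro p _
      simp only [List.length_cons]
      push_cast
      have e : (t.length : Int) + 1 - 1 = 0 + (t.length : Int) := by ring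
      rw [e]
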